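-- pv_equiv track=rewrite | github.com/MatiPl01/Programowanie-Imperatywne | 8. Laboratorium/Zadanie1/debug.py | yield_res
-- ===== SOURCE A (Python) =====
-- def check(S, X):
-- 	'''Check if S can be obtained by summing X in the way described'''
-- 	if S == 0 and X != -1: return False
-- 	if X > S: return False
-- 	while X and S >= 0:
-- 		S -= X
-- 		X //= 10
-- 	if S:
-- 		return False
-- 	return True
--
-- def yield_res(n, m=None):
-- 	''''Prints sums S and X values which correspond to them'''
-- 	low = 0 if n < 100 else int(f'9{"0" * (len(str(n)) - 3)}1')
-- 	if m is None: m = n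
-- 	max_len = len(str(m))
-- 	for S in range(n, m + 1):
-- 		for X in range(low, S + 1):
-- 			if check(S, X):
-- 				low = X + 1
-- 				yield X
-- 				break
-- 		else:
-- 			yield -1
-- ===== SOURCE B (Python) =====
-- def shiftsum(x):
--     s = 0
--     while x:
--         s += x
--         x //= 10
--     return s
--
-- def yield_res(n, m=None):
--     '''One pass over candidate X: index each shift-sum S by its (unique) X, then read the range off the index.
--     Since shiftsum(x) <= 10*x/9, no candidate below 9*n//10 can reach a sum >= n.'''
--     if m is None:
--         m = n
--     first = {}
--     if n <= m:
--         for x in range(max(1, 9 * n // 10), m + 1):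
--             s = shiftsum(x)
--             if n <= s <= m:
--                 first[s] = x
--     for s in range(n, m + 1):
--         yield first.get(s, -1)
-- ===== Notes on version B (the rewrite author's own statement) =====
-- stated objective: alternative
-- what changed: Instead of scanning X upward for each S with a carried lower bound and a per-candidate check() subtraction loop, B makes one pass over candidates X (from the sound lower bound 9n//10, skipped when the range is empty), computes each X's digit-shift sum directly, indexes it in a dict S->X, and reads the answers for the whole range off that index.
import Mathlib
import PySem

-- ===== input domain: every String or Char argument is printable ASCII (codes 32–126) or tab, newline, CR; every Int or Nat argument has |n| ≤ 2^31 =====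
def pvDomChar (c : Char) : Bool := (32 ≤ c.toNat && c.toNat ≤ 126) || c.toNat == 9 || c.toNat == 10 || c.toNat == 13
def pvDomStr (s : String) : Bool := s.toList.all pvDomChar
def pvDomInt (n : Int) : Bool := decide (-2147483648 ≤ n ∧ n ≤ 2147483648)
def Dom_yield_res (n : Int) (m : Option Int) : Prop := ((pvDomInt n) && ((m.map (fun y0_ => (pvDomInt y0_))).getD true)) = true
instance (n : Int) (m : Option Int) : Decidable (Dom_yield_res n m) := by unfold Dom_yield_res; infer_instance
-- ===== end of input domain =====

-- B replaces A's per-S upward scan (with carried lower bound) by one pass over candidates X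
-- that indexes each shift-sum in a dict S -> X and reads the whole range off that index.


-- ===== PORT A =====
-- `while X and S >= 0: S -= X; X //= 10`, returning the final S.  The guard is written `0 < X`:
-- yield_res only calls check with X drawn from range(low, S+1) and low ≥ 0, and for X = 0 the
-- Python loop also stops; (for X < 0 the Python loop would not terminate, which is unreachable).
def checkLoop (S X : Int) : Int :=
  if 0 < X ∧ 0 ≤ S then checkLoop (S - X) (PySem.Int.floordiv X 10) else S
termination_by X.toNat
decreasing_by
  rename_i h
  have h10 : PySem.Int.floordiv X 10 = X / 10 := PySem.Int.floordiv_eq_ediv_of_pos (by omega)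
  omega

def check (S X : Int) : Bool :=
  if S == 0 && X != -1 then false
  else if X > S then false
  else if checkLoop S X != 0 then false
  else true

def yield_res (n : Int) (m : Option Int) : List Int :=
  -- int(f'9{"0" * (len(str(n)) - 3)}1'): the string is always a valid int literal, so `.getD 0` never supplies its default
  let low0 : Int := if n < 100 then 0 else
    (PySem.Int.ofStr? ("9" ++ String.ofList (List.replicate ((PySem.Str.len (PySem.Int.toStr n) - 3).toNat) '0') ++ "1")).getD 0
  let m' : Int := m.getD n
  let _max_len := PySem.Str.len (PySem.Int.toStr m')   -- computed and unused, as in the Python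
  ((PySem.List.pyRange n (m' + 1) 1).foldl
    (fun (st : Int × List Int) S =>
      match (PySem.List.pyRange st.1 (S + 1) 1).find? (fun X => check S X) with
      | some X => (X + 1, st.2 ++ [X])
      | none => (st.1, st.2 ++ [-1]))
    (low0, ([] : List Int))).2

-- ===== PORT B =====
-- `while x: s += x; x //= 10` of Source B; guard written `0 < x` (shiftsum is only applied to x from
-- range(1, m+1); for x < 0 the Python loop would not terminate, which is unreachable).
def shiftsumLoop (s x : Int) : Int :=
  if 0 < x then shiftsumLoop (s + x) (PySem.Int.floordiv x 10) else s
termination_by x.toNat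
decreasing_by
  rename_i h
  have h10 : PySem.Int.floordiv x 10 = x / 10 := PySem.Int.floordiv_eq_ediv_of_pos (by omega)
  omega

def shiftsum (x : Int) : Int := shiftsumLoop 0 x

def yield_res_alt (n : Int) (m : Option Int) : List Int :=
  let m' : Int := m.getD n
  let first : PySem.Dict Int Int :=
    if n ≤ m' then
      (PySem.List.pyRange (max 1 (PySem.Int.floordiv (9 * n) 10)) (m' + 1) 1).foldl
        (fun d x => let s := shiftsum x; if n ≤ s ∧ s ≤ m' then d.insert s x else d)
        PySem.Dict.empty
    else PySem.Dict.empty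
  (PySem.List.pyRange n (m' + 1) 1).map (fun s => first.getD s (-1))

-- ===== PRECONDITION & SPEC =====
def Spec_yield_res (n : Int) (m : Option Int) (out : List Int) : Prop := out = yield_res_alt n m
instance (n : Int) (m : Option Int) (out : List Int) : Decidable (Spec_yield_res n m out) := by unfold Spec_yield_res; infer_instance

-- ===== CLAIM (what is proved, stated in full; the proofs are below) =====
def Claim_equal_yield_res : Prop := ∀ (n : Int) (m : Option Int), Dom_yield_res n m → Spec_yield_res n m (yield_res n m)

-- ===== LEMMAS AND PROOFS =====

-- The mathematical digit-shift sum  F x = x + x/10 + x/100 + …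
def F (x : Nat) : Nat := if x = 0 then 0 else x + F (x / 10)
decreasing_by exact Nat.div_lt_self (by omega) (by omega)

lemma F_zero : F 0 = 0 := by simp [F]

lemma F_pos_def (x : Nat) (h : x ≠ 0) : F x = x + F (x / 10) := by
  rw [F]; simp [h]

lemma F_mono : ∀ {x y : Nat}, x ≤ y → F x ≤ F y := by
  intro x y
  induction y using Nat.strong_induction_on generalizing x with
  | _ y ih =>
    intro hxy
    rcases Nat.eq_zero_or_pos x with hx | hx
    · subst hx; simp [F_zero]
    · have hy : y ≠ 0 := by omega
      rw [F_pos_def x (by omega), F_pos_def y hy]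
      have : F (x / 10) ≤ F (y / 10) := by
        rcases Nat.eq_or_lt_of_le hxy with rfl | hlt
        · exact le_refl _
        · exact ih (y / 10) (Nat.div_lt_self (by omega) (by omega))
            (Nat.div_le_div_right hxy)
      omega

lemma F_strict : ∀ {x y : Nat}, x < y → F x < F y := by
  intro x y hxy
  rcases Nat.eq_zero_or_pos x with hx | hx
  · subst hx
    rw [F_zero, F_pos_def y (by omega)]
    omega
  · rw [F_pos_def x (by omega), F_pos_def y (by omega)]
    have := F_mono (Nat.div_le_div_right (c := 10) (Nat.le_of_lt hxy))
    omega

lemma F_inj {x y : Nat} (h : F x = F y) : x = y := by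
  rcases lt_trichotomy x y with h1 | h1 | h1
  · exact absurd h (Nat.ne_of_lt (F_strict h1))
  · exact h1
  · exact absurd h.symm (Nat.ne_of_lt (F_strict h1))

lemma F_ge (x : Nat) : x ≤ F x := by
  rcases Nat.eq_zero_or_pos x with hx | hx
  · simp [hx, F_zero]
  · rw [F_pos_def x (by omega)]; omega

lemma F_nine : ∀ j : Nat, F (9 * 10 ^ j) = 10 ^ (j + 1) - 1 := by
  intro j
  induction j with
  | zero =>
    norm_num
    rw [F_pos_def 9 (by omega)]
    norm_num [F_zero]
  | succ j ih =>
    have hdiv : 9 * 10 ^ (j + 1) / 10 = 9 * 10 ^ j := by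
      rw [pow_succ]
      omega
    rw [F_pos_def _ (by positivity), hdiv, ih]
    have h1 : (1:Nat) ≤ 10 ^ (j+1) := Nat.one_le_pow _ _ (by omega)
    rw [pow_succ (10:Nat) (j+1)]
    omega

-- checkLoop characterisation
lemma checkLoop_hit : ∀ (x : Nat) (t : Int), 0 ≤ t → checkLoop ((F x : Int) + t) (x : Int) = t := by
  intro x
  induction x using Nat.strong_induction_on with
  | _ x ih =>
    intro t ht
    rcases Nat.eq_zero_or_pos x with hx | hx
    · subst hx; rw [checkLoop]; simp [F_zero]
    · rw [checkLoop]
      have hg : 0 < (x : Int) ∧ 0 ≤ (F x : Int) + t := by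
        constructor <;> [exact_mod_cast hx; positivity]
      rw [if_pos hg]
      have hfd : PySem.Int.floordiv (x : Int) 10 = ((x / 10 : Nat) : Int) := by
        exact_mod_cast PySem.Int.floordiv_natCast x 10
      have hF : (F x : Int) + t - (x : Int) = (F (x / 10) : Int) + t := by
        rw [F_pos_def x (by omega)]; push_cast; ring
      rw [hfd, hF]
      exact ih (x / 10) (Nat.div_lt_self hx (by omega)) t ht

lemma checkLoop_miss : ∀ (x : Nat) (S : Int), S ≠ (F x : Int) → checkLoop S (x : Int) ≠ 0 := by
  intro x
  induction x using Nat.strong_induction_on with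
  | _ x ih =>
    intro S hS
    rcases Nat.eq_zero_or_pos x with hx | hx
    · subst hx
      simp only [F_zero, Nat.cast_zero] at hS
      rw [checkLoop, if_neg (by simp)]
      exact hS
    · rw [checkLoop]
      by_cases hSpos : 0 ≤ S
      · rw [if_pos ⟨by exact_mod_cast hx, hSpos⟩]
        have hfd : PySem.Int.floordiv (x : Int) 10 = ((x / 10 : Nat) : Int) := by
          exact_mod_cast PySem.Int.floordiv_natCast x 10
        rw [hfd]
        refine ih (x / 10) (Nat.div_lt_self hx (by omega)) _ ?_
        intro hc
        apply hS
        rw [F_pos_def x (by omega)]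
        push_cast
        omega
      · rw [if_neg (by omega)]
        omega

lemma check_iff (S X : Int) (hX : 0 ≤ X) :
    check S X = true ↔ ((F X.toNat : Int) = S ∧ S ≠ 0) := by
  have hXc : ((X.toNat : Nat) : Int) = X := Int.toNat_of_nonneg hX
  unfold check
  by_cases hS0 : S = 0
  · subst hS0
    have : (X != -1) = true := by simp; omega
    simp [this]
  · have h1 : (S == 0 && X != -1) = false := by simp [hS0]
    rw [h1]
    simp only [Bool.false_eq_true, if_false]
    by_cases hXS : X > S
    · rw [if_pos hXS]
      simp only [Bool.false_eq_true, false_iff]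
      rintro ⟨hF, -⟩
      have := F_ge X.toNat
      omega
    · rw [if_neg hXS]
      constructor
      · intro h
        refine ⟨?_, hS0⟩
        by_contra hne
        have := checkLoop_miss X.toNat S (by omega)
        rw [hXc] at this
        simp only [bne_iff_ne, ne_eq, ite_not] at h
        split at h
        · omega
        · simp at h
      · rintro ⟨hF, -⟩
        have h0 : checkLoop S X = 0 := by
          have := checkLoop_hit X.toNat 0 le_rfl
          rw [hXc] at this
          simpa [hF] using this
        simp [h0]

-- shiftsum characterisation
lemma shiftsumLoop_eq : ∀ (x : Nat) (s : Int), shiftsumLoop s (x : Int) = s + (F x : Int) := by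
  intro x
  induction x using Nat.strong_induction_on with
  | _ x ih =>
    intro s
    rcases Nat.eq_zero_or_pos x with hx | hx
    · subst hx; rw [shiftsumLoop]; simp [F_zero]
    · rw [shiftsumLoop, if_pos (by exact_mod_cast hx)]
      have hfd : PySem.Int.floordiv (x : Int) 10 = ((x / 10 : Nat) : Int) := by
        exact_mod_cast PySem.Int.floordiv_natCast x 10
      rw [hfd, ih (x / 10) (Nat.div_lt_self hx (by omega))]
      rw [F_pos_def x (by omega)]
      push_cast
      ring

lemma shiftsum_eq (x : Nat) : shiftsum (x : Int) = (F x : Int) := by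
  unfold shiftsum
  simpa using shiftsumLoop_eq x 0

-- the common answer function: the unique X ≥ 1 with shift-sum S, else -1
def gAns (S : Int) : Int :=
  match (List.range (S.toNat + 1)).find? (fun x => ((F x : Int) == S) && (S != 0)) with
  | some x => (x : Int)
  | none => -1

-- a find? with a uniquely-satisfied predicate
lemma find?_unique {α : Type} (l : List α) (p : α → Bool) (x : α)
    (hmem : x ∈ l) (hx : p x = true) (huniq : ∀ y ∈ l, p y = true → y = x) :
    l.find? p = some x := by
  have hsome : (l.find? p).isSome := List.find?_isSome.mpr ⟨x, hmem, hx⟩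
  rcases Option.isSome_iff_exists.mp hsome with ⟨z, hz⟩
  have hz1 := List.find?_some hz
  have hz2 := List.mem_of_find?_eq_some hz
  rw [hz, huniq z hz2 hz1]

lemma gAns_hit (S : Int) (x : Nat) (hx : (F x : Int) = S) (hS : S ≠ 0) : gAns S = x := by
  have hle : x ≤ S.toNat := by
    have h1 := F_ge x
    omega
  unfold gAns
  rw [find?_unique (List.range (S.toNat + 1)) _ x
      (List.mem_range.mpr (by omega)) (by simp [hx, hS])
      (fun y _ hy => by
        simp only [Bool.and_eq_true, beq_iff_eq] at hy
        exact F_inj (by exact_mod_cast hy.1.trans hx.symm))]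

lemma gAns_miss (S : Int) (h : ∀ x : Nat, ¬((F x : Int) = S ∧ S ≠ 0)) : gAns S = -1 := by
  unfold gAns
  rw [List.find?_eq_none.mpr (fun x _ => by
    simp only [Bool.and_eq_true, beq_iff_eq, bne_iff_ne, ne_eq, not_and]
    intro hF
    exact fun hS => (h x) ⟨hF, hS⟩)]

-- ===== A-side: the outer fold yields gAns pointwise =====

lemma A_loop : ∀ (N : Nat) (a low b : Int) (acc : List Int), (b - a).toNat ≤ N → 0 ≤ low →
    (∀ x : Nat, (x : Int) < low → (F x : Int) < a) →
    ((PySem.List.pyRange a b 1).foldl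
      (fun (st : Int × List Int) S =>
        match (PySem.List.pyRange st.1 (S + 1) 1).find? (fun X => check S X) with
        | some X => (X + 1, st.2 ++ [X])
        | none => (st.1, st.2 ++ [-1]))
      (low, acc)).2 = acc ++ (PySem.List.pyRange a b 1).map gAns := by
  intro N
  induction N with
  | zero =>
    intro a low b acc hN h0 hinv
    rw [PySem.List.pyRange_one_eq_nil (by omega)]
    simp
  | succ N ih =>
    intro a low b acc hN h0 hinv
    by_cases hab : b ≤ a
    · rw [PySem.List.pyRange_one_eq_nil hab]; simp
    · replace hab : a < b := by omega
      rw [PySem.List.pyRange_one_cons hab]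
      simp only [List.foldl_cons, List.map_cons]
      by_cases hex : ∃ x : Nat, (F x : Int) = a ∧ a ≠ 0
      · obtain ⟨x, hFx, ha0⟩ := hex
        have hlowx : low ≤ (x : Int) := by
          by_contra hc
          replace hc : (x : Int) < low := by omega
          exact absurd hFx (ne_of_lt (hinv x hc))
        have hxa : (x : Int) < a + 1 := by
          have h1 := F_ge x
          have h2 : ((x : Nat) : Int) ≤ (F x : Int) := by exact_mod_cast h1
          omega
        have hfind : (PySem.List.pyRange low (a + 1) 1).find? (fun X => check a X)
            = some (x : Int) := by
          apply find?_unique _ _ _ (PySem.List.mem_pyRange_one.mpr ⟨hlowx, hxa⟩)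
          · rw [check_iff a (x : Int) (by positivity)]
            simpa using ⟨hFx, ha0⟩
          · intro y hy hcy
            have hy' := PySem.List.mem_pyRange_one.mp hy
            have h0y : (0:Int) ≤ y := le_trans h0 hy'.1
            rw [check_iff a y h0y] at hcy
            have hyx : y.toNat = x :=
              F_inj (by exact_mod_cast hcy.1.trans hFx.symm)
            omega
        rw [hfind]
        have hinv' : ∀ z : Nat, (z : Int) < (x : Int) + 1 → (F z : Int) < a + 1 := by
          intro z hz
          have hzx : z ≤ x := by exact_mod_cast (by omega : (z : Int) ≤ (x : Int))
          have := F_mono hzx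
          omega
        rw [ih (a + 1) ((x : Int) + 1) b (acc ++ [(x : Int)]) (by omega) (by positivity) hinv']
        rw [gAns_hit a x hFx ha0]
        simp
      · replace hex : ∀ x : Nat, (F x : Int) = a → a = 0 := by
          intro x hx
          by_contra h0
          exact hex ⟨x, hx, h0⟩
        have hfind : (PySem.List.pyRange low (a + 1) 1).find? (fun X => check a X) = none := by
          apply List.find?_eq_none.mpr
          intro y hy
          have hy' := PySem.List.mem_pyRange_one.mp hy
          have h0y : (0:Int) ≤ y := le_trans h0 hy'.1
          rw [check_iff a y h0y]
          rintro ⟨h1, h2⟩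
          exact h2 (hex y.toNat h1)
        rw [hfind]
        have hinv' : ∀ z : Nat, (z : Int) < low → (F z : Int) < a + 1 := by
          intro z hz
          have := hinv z hz
          omega
        rw [ih (a + 1) low b (acc ++ [-1]) (by omega) h0 hinv']
        rw [gAns_miss a (fun z hz => hz.2 (hex z hz.1))]
        simp

-- ===== B-side: the dict lookup yields gAns pointwise =====

-- 9 * F x ≤ 10 * x  (geometric bound on the shift-sum)
lemma F_bound : ∀ x : Nat, 9 * F x ≤ 10 * x := by
  intro x
  induction x using Nat.strong_induction_on with
  | _ x ih =>
    rcases Nat.eq_zero_or_pos x with hx | hx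
    · simp [hx, F_zero]
    · rw [F_pos_def x (by omega)]
      have := ih (x / 10) (Nat.div_lt_self hx (by omega))
      omega

-- first candidate in [a, b) whose shift-sum is S, else -1
def hitI (a b S : Int) : Int :=
  match (PySem.List.pyRange a b 1).find? (fun x => shiftsum x == S) with
  | some x => x
  | none => -1

lemma shiftsum_toNat (y : Int) (hy : 0 ≤ y) : shiftsum y = (F y.toNat : Int) := by
  have := shiftsum_eq y.toNat
  rwa [Int.toNat_of_nonneg hy] at this

lemma hitI_hit (a b S : Int) (ha : 0 ≤ a) (x : Nat) (hax : a ≤ (x : Int))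
    (hxb : (x : Int) < b) (hFx : (F x : Int) = S) : hitI a b S = (x : Int) := by
  unfold hitI
  rw [find?_unique _ _ ((x : Int)) (PySem.List.mem_pyRange_one.mpr ⟨hax, hxb⟩)
      (by simp [shiftsum_eq, hFx])
      (fun y hy hcy => by
        have hy' := PySem.List.mem_pyRange_one.mp hy
        have h0y : (0:Int) ≤ y := le_trans ha hy'.1
        rw [shiftsum_toNat y h0y] at hcy
        simp only [beq_iff_eq] at hcy
        have : y.toNat = x := F_inj (by exact_mod_cast hcy.trans hFx.symm)
        omega)]

lemma hitI_miss (a b S : Int) (ha : 0 ≤ a) (h : ∀ x : Nat, a ≤ (x : Int) → (x : Int) < b →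
    (F x : Int) ≠ S) : hitI a b S = -1 := by
  unfold hitI
  rw [List.find?_eq_none.mpr (fun y hy => by
    have hy' := PySem.List.mem_pyRange_one.mp hy
    have h0y : (0:Int) ≤ y := le_trans ha hy'.1
    rw [shiftsum_toNat y h0y]
    simp only [beq_iff_eq]
    have hc := h y.toNat (by omega) (by omega)
    exact hc)]

lemma B_fold (n m' : Int) : ∀ (t : Nat) (a : Int), 1 ≤ a → ∀ (S : Int), n ≤ S → S ≤ m' →
    (((PySem.List.pyRange a (a + (t : Int)) 1).foldl
      (fun d x => let s := shiftsum x; if n ≤ s ∧ s ≤ m' then d.insert s x else d)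
      (PySem.Dict.empty : PySem.Dict Int Int)).getD S (-1)) = hitI a (a + (t : Int)) S := by
  intro t
  induction t with
  | zero =>
    intro a ha S hnS hSm
    rw [show a + ((0:Nat) : Int) = a by norm_num, PySem.List.pyRange_one_eq_nil le_rfl]
    simp only [List.foldl_nil, PySem.Dict.getD_empty]
    exact (hitI_miss a a S (by omega) (fun x h1 h2 => by omega)).symm
  | succ t ih =>
    intro a ha S hnS hSm
    have hsplit : a + ((t + 1 : Nat) : Int) = (a + (t : Int)) + 1 := by push_cast; ring
    rw [hsplit, PySem.List.pyRange_one_succ_right (by omega), List.foldl_append,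
        List.foldl_cons, List.foldl_nil]
    have h0at : (0:Int) ≤ a + (t : Int) := by omega
    have hss : shiftsum (a + (t : Int)) = (F (a + (t : Int)).toNat : Int) :=
      shiftsum_toNat _ h0at
    simp only [hss]
    by_cases hFS : (F (a + (t : Int)).toNat : Int) = S
    · have hrange : n ≤ (F (a + (t : Int)).toNat : Int) ∧ (F (a + (t : Int)).toNat : Int) ≤ m' := by
        rw [hFS]; exact ⟨hnS, hSm⟩
      rw [if_pos hrange, PySem.Dict.getD_insert, if_pos hFS.symm]
      rw [hitI_hit a ((a + (t : Int)) + 1) S (by omega) (a + (t : Int)).toNat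
          (by omega) (by omega) hFS]
      omega
    · have hstep : hitI a ((a + (t : Int)) + 1) S = hitI a (a + (t : Int)) S := by
        unfold hitI
        rw [PySem.List.pyRange_one_succ_right (by omega), List.find?_append]
        have hone : [a + (t : Int)].find? (fun x => shiftsum x == S) = none := by
          simp [hss, hFS]
        rw [hone, Option.or_none]
      rw [hstep]
      by_cases hrange : n ≤ (F (a + (t : Int)).toNat : Int) ∧ (F (a + (t : Int)).toNat : Int) ≤ m'
      · rw [if_pos hrange, PySem.Dict.getD_insert, if_neg (fun hc => hFS hc.symm)]
        exact ih a ha S hnS hSm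
      · rw [if_neg hrange]
        exact ih a ha S hnS hSm

-- no candidate below max 1 (9n // 10) can have shift-sum S ≥ n
lemma lowbound_sound (n S : Int) (hnS : n ≤ S) (hS0 : S ≠ 0) :
    ∀ x : Nat, (x : Int) < max 1 (PySem.Int.floordiv (9 * n) 10) → (F x : Int) ≠ S := by
  intro x hx hFx
  rcases le_or_gt (max 1 (PySem.Int.floordiv (9 * n) 10)) 1 with h1 | h1
  · have : x = 0 := by omega
    subst this
    rw [F_zero] at hFx
    exact hS0 (by exact_mod_cast hFx.symm)
  · have hfd : max 1 (PySem.Int.floordiv (9 * n) 10) = PySem.Int.floordiv (9 * n) 10 := by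
      omega
    rw [hfd] at hx
    have hdiv : 10 * PySem.Int.floordiv (9 * n) 10 ≤ 9 * n := by
      have hm := PySem.Int.floordiv_mul_add_mod (9 * n) 10
      have hmod : PySem.Int.mod (9 * n) 10 = (9 * n) % 10 :=
        PySem.Int.mod_eq_emod_of_pos (by omega)
      have := Int.emod_nonneg (9 * n) (show (10:Int) ≠ 0 by omega)
      omega
    have hFb := F_bound x
    have hFb' : 9 * (F x : Int) ≤ 10 * (x : Int) := by exact_mod_cast hFb
    omega

lemma B_dict (n m' : Int) : ∀ (S : Int), n ≤ S → S ≤ m' →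
    ((if n ≤ m' then
        (PySem.List.pyRange (max 1 (PySem.Int.floordiv (9 * n) 10)) (m' + 1) 1).foldl
          (fun d x => let s := shiftsum x; if n ≤ s ∧ s ≤ m' then d.insert s x else d)
          (PySem.Dict.empty : PySem.Dict Int Int)
      else PySem.Dict.empty).getD S (-1)) = gAns S := by
  intro S hnS hSm
  rw [if_pos (le_trans hnS hSm)]
  set a : Int := max 1 (PySem.Int.floordiv (9 * n) 10) with hadef
  have ha1 : 1 ≤ a := le_max_left _ _
  by_cases hm : 1 ≤ m'
  · have ham : a ≤ m' + 1 := by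
      rcases le_or_gt n 0 with hn0 | hn0
      · have : PySem.Int.floordiv (9 * n) 10 ≤ 0 := by
          have hm2 := PySem.Int.floordiv_mul_add_mod (9 * n) 10
          have hmod : PySem.Int.mod (9 * n) 10 = (9 * n) % 10 :=
            PySem.Int.mod_eq_emod_of_pos (by omega)
          have h1 := Int.emod_nonneg (9 * n) (show (10:Int) ≠ 0 by omega)
          have h2 := Int.emod_lt_of_pos (9 * n) (show (0:Int) < 10 by omega)
          omega
        omega
      · have : 10 * PySem.Int.floordiv (9 * n) 10 ≤ 9 * n := by
          have hm2 := PySem.Int.floordiv_mul_add_mod (9 * n) 10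
          have hmod : PySem.Int.mod (9 * n) 10 = (9 * n) % 10 :=
            PySem.Int.mod_eq_emod_of_pos (by omega)
          have h1 := Int.emod_nonneg (9 * n) (show (10:Int) ≠ 0 by omega)
          omega
        omega
    have ht : m' + 1 = a + (((m' + 1 - a).toNat : Nat) : Int) := by omega
    rw [ht, B_fold n m' (m' + 1 - a).toNat a ha1 S hnS hSm]
    by_cases hex : ∃ x : Nat, (F x : Int) = S ∧ S ≠ 0
    · obtain ⟨x, hFx, hS0⟩ := hex
      have hax : a ≤ (x : Int) := by
        by_contra hc
        exact lowbound_sound n S hnS hS0 x (by omega) hFx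
      have hxb : (x : Int) < a + (((m' + 1 - a).toNat : Nat) : Int) := by
        have h1 := F_ge x
        have h2 : ((x : Nat) : Int) ≤ (F x : Int) := by exact_mod_cast h1
        omega
      rw [hitI_hit a _ S (by omega) x hax hxb hFx, gAns_hit S x hFx hS0]
    · replace hex : ∀ x : Nat, (F x : Int) = S → S = 0 := by
        intro x hx
        by_contra h0
        exact hex ⟨x, hx, h0⟩
      rw [gAns_miss S (fun z hz => hz.2 (hex z hz.1))]
      apply hitI_miss a _ S (by omega)
      intro x h1 h2 hFx
      have hx0 : 0 < x := by omega
      have hS0 : S ≠ 0 := by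
        have hg := F_ge x
        have hg' : ((x : Nat) : Int) ≤ (F x : Int) := by exact_mod_cast hg
        omega
      exact hS0 (hex x hFx)
  · rw [PySem.List.pyRange_one_eq_nil (by omega)]
    simp only [List.foldl_nil, PySem.Dict.getD_empty]
    refine (gAns_miss S (fun x hx => ?_)).symm
    rcases hx with ⟨h1, h2⟩
    rcases Nat.eq_zero_or_pos x with h | h
    · subst h; rw [F_zero] at h1; exact h2 (by exact_mod_cast h1.symm)
    · have hg : ((x : Nat) : Int) ≤ (F x : Int) := by exact_mod_cast F_ge x
      omega

-- ===== seed bound =====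

lemma seed_bound (n : Int) (h100 : 100 ≤ n) (hdom : n ≤ 2147483648) :
    0 ≤ ((PySem.Int.ofStr? ("9" ++ String.ofList (List.replicate ((PySem.Str.len (PySem.Int.toStr n) - 3).toNat) '0') ++ "1")).getD 0) ∧
    ∀ x : Nat, (x : Int) < ((PySem.Int.ofStr? ("9" ++ String.ofList (List.replicate ((PySem.Str.len (PySem.Int.toStr n) - 3).toNat) '0') ++ "1")).getD 0) →
      (F x : Int) < n := by
  -- 10^(e-1) ≤ n < 10^e for some 3 ≤ e ≤ 10
  obtain ⟨e, he3, he10, helo, hehi⟩ :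
      ∃ e : Nat, 3 ≤ e ∧ e ≤ 10 ∧ (10:Int) ^ (e - 1) ≤ n ∧ n < (10:Int) ^ e := by
    by_cases h : n < 1000
    · exact ⟨3, by omega, by omega, by norm_num; omega, by norm_num; omega⟩
    · by_cases h4 : n < 10000
      · exact ⟨4, by omega, by omega, by norm_num; omega, by norm_num; omega⟩
      · by_cases h5 : n < 100000
        · exact ⟨5, by omega, by omega, by norm_num; omega, by norm_num; omega⟩
        · by_cases h6 : n < 1000000
          · exact ⟨6, by omega, by omega, by norm_num; omega, by norm_num; omega⟩
          · by_cases h7 : n < 10000000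
            · exact ⟨7, by omega, by omega, by norm_num; omega, by norm_num; omega⟩
            · by_cases h8 : n < 100000000
              · exact ⟨8, by omega, by omega, by norm_num; omega, by norm_num; omega⟩
              · by_cases h9 : n < 1000000000
                · exact ⟨9, by omega, by omega, by norm_num; omega, by norm_num; omega⟩
                · exact ⟨10, by omega, by omega, by norm_num; omega, by norm_num; omega⟩
  -- the digit string of n has length ≤ e
  have hlen : (PySem.Str.len (PySem.Int.toStr n)).toNat ≤ e := by
    have hnn : ¬ n < 0 := by omega
    have hcast : ((10 ^ e : Nat) : Int) = (10:Int) ^ e := by push_cast; ring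
    have hne : n.toNat < 10 ^ e := by omega
    have := Nat.toDigits_length 10 n.toNat e (by omega) hne
    simp only [PySem.Str.len, PySem.Int.toStr, PySem.Int.toChars, hnn, if_false,
      String.toList_ofList]
    omega
  set k : Nat := (PySem.Str.len (PySem.Int.toStr n) - 3).toNat with hk
  have hk7 : k ≤ 7 := by
    have h0 : 0 ≤ PySem.Str.len (PySem.Int.toStr n) := by
      simp [PySem.Str.len]
    omega
  have hke : k + 2 ≤ e - 1 := by
    have h0 : 0 ≤ PySem.Str.len (PySem.Int.toStr n) := by
      simp [PySem.Str.len]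
    omega
  -- the parsed seed is 9 * 10^(k+1) + 1, and F (9 * 10^(k+1)) = 10^(k+2) - 1 < 10^(e-1) ≤ n
  have hseed : (PySem.Int.ofStr? ("9" ++ String.ofList (List.replicate k '0') ++ "1")).getD 0
      = ((9 * 10 ^ (k + 1) + 1 : Nat) : Int) := by
    interval_cases k <;> decide
  rw [hseed]
  refine ⟨by positivity, ?_⟩
  intro x hx
  have hxle : x ≤ 9 * 10 ^ (k + 1) := by omega
  have hFle : F x ≤ 10 ^ (k + 2) - 1 := by
    have := F_mono hxle
    rw [F_nine (k + 1)] at this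
    omega
  have hpow : (10:Nat) ^ (k + 2) ≤ 10 ^ (e - 1) := Nat.pow_le_pow_right (by omega) hke
  have hlast : ((10 ^ (e - 1) : Nat) : Int) ≤ n := by push_cast at helo ⊢; omega
  have hlt2 : F x < 10 ^ (k + 2) :=
    lt_of_le_of_lt hFle (Nat.sub_lt (by positivity) one_pos)
  have : F x < 10 ^ (e - 1) := lt_of_lt_of_le hlt2 hpow
  calc (F x : Int) < ((10 ^ (e - 1) : Nat) : Int) := by exact_mod_cast this
    _ ≤ n := hlast

-- ===== VERDICT (by name: the statement is the Claim_ definition above) =====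
theorem yield_res_spec : Claim_equal_yield_res := by
  intro n m hdom
  have hdom' : n ≤ 2147483648 := by
    simp only [Dom_yield_res, pvDomInt, Bool.and_eq_true, decide_eq_true_eq] at hdom
    exact hdom.1.2
  unfold Spec_yield_res
  have hA : yield_res n m = (PySem.List.pyRange n (m.getD n + 1) 1).map gAns := by
    simp only [yield_res]
    by_cases h100 : n < 100
    · rw [if_pos h100,
        A_loop ((m.getD n + 1) - n).toNat n 0 (m.getD n + 1) [] le_rfl le_rfl
          (fun x hx => absurd hx (by omega))]
      simp
    · obtain ⟨hs0, hsinv⟩ := seed_bound n (by omega) hdom'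
      rw [if_neg h100,
        A_loop ((m.getD n + 1) - n).toNat n _ (m.getD n + 1) [] le_rfl hs0 hsinv]
      simp
  have hB : yield_res_alt n m = (PySem.List.pyRange n (m.getD n + 1) 1).map gAns := by
    simp only [yield_res_alt]
    apply List.map_congr_left
    intro S hS
    obtain ⟨h1, h2⟩ := PySem.List.mem_pyRange_one.mp hS
    exact B_dict n (m.getD n) S h1 (by omega)
  rw [hA, hB]
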